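-- pv_equiv track=rewrite | github.com/crystallikelaw/pythonplayground | add-digits.py | add_dig
-- ===== SOURCE A (Python) =====
-- def add_dig(n: int) -> int:
--     '''
--     incident (stroke?) add to total
--     '''
--     assert type(n) is int, 'input must be int'
--     assert n >= 0, 'input must be >= 0'
--     steps = 0
--     digits = [int(x) for x in str(n)]
--     while len(digits) > 1:
--         digits = [int(x) for x in str(sum(digits))]
--         steps += 1
--     return steps
-- ===== SOURCE B (Python) =====
-- def add_dig(n: int) -> int:
--     '''
--     incident (stroke?) add to total
--     '''
--     assert type(n) is int, 'input must be int'
--     assert n >= 0, 'input must be >= 0'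
--     if n < 10:
--         return 0
--     s = 0
--     m = n
--     while m > 0:
--         s += m % 10
--         m //= 10
--     return 1 + add_dig(s)
-- ===== Notes on version B (the rewrite author's own statement) =====
-- stated objective: alternative
-- what changed: Replaces the iterative loop that rebuilds a digit list from str() at every step by a recursion that bottoms out on a single-digit input and otherwise adds one step and recurses on the digit sum, with the digit sum computed arithmetically by modulus and floor division instead of any string conversion.
import Mathlib
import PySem

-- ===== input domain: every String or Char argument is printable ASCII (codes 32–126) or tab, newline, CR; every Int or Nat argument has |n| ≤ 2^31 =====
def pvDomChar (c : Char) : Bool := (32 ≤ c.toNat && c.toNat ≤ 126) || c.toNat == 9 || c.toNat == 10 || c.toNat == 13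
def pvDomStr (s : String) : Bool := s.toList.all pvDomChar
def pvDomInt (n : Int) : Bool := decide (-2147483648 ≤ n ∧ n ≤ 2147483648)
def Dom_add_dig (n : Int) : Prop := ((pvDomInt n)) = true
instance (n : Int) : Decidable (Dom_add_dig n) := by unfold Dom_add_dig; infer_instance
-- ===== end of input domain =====

-- B replaces A's string-rebuilding while-loop by a recursion on the arithmetic digit sum
-- (% 10 / //= 10); same return value wherever A returns (Pre_: 0 ≤ n, A's assert).

-- ===== PORT A =====
-- int(x) on the one-character string x; PySem.Int.ofChars? is int(s). The .getD 0 is a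
-- totality guard reachable only on non-digit characters, which never occur for n ≥ 0.
def pvCharInt (c : Char) : Int := (PySem.Int.ofChars? [c]).getD 0

-- [int(x) for x in str(m)]
def pvStrDigits (m : Int) : List Int := (PySem.Int.toChars m).map pvCharInt

-- A's while-loop; the fuel is a totality guard only (n + 1 iterations always suffice on Pre_,
-- proved in pvLoopA_eq_altGo below).
def pvLoopA : Nat → List Int → Int → Int
  | 0, _, steps => steps
  | fuel + 1, digits, steps =>
      if 1 < digits.length then pvLoopA fuel (pvStrDigits digits.sum) (steps + 1) else steps

-- assert n >= 0 raises for n < 0 (excluded by Pre_); the value 0 there is arbitrary.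
def add_dig (n : Int) : Int :=
  if n < 0 then 0 else pvLoopA (n.toNat + 1) (pvStrDigits n) 0

-- ===== PORT B =====
-- s = 0; while m > 0: s += m % 10; m //= 10   (fuel is a totality guard only:
-- m + 1 iterations always suffice, proved in pvDigitSumGo_eq below)
def pvDigitSumGo : Nat → Int → Int → Int
  | 0, _, s => s
  | fuel + 1, m, s =>
      if 0 < m then pvDigitSumGo fuel (PySem.Int.floordiv m 10) (s + PySem.Int.mod m 10) else s

def pvDigitSum (m : Int) : Int := pvDigitSumGo (m.toNat + 1) m 0

-- 0 if n < 10 else 1 + add_dig(digit_sum n); fuel again only a totality guard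
def pvAltGo : Nat → Int → Int
  | 0, _ => 0
  | fuel + 1, n => if n < 10 then 0 else 1 + pvAltGo fuel (pvDigitSum n)

-- assert n >= 0 raises for n < 0 (excluded by Pre_); the value 0 there is arbitrary.
def add_dig_alt (n : Int) : Int := if n < 0 then 0 else pvAltGo (n.toNat + 1) n

-- ===== PRECONDITION & SPEC =====
-- A's 'assert n >= 0' raises AssertionError on negative n (B raises there too).
def Pre_add_dig (n : Int) : Prop := 0 ≤ n
instance (n : Int) : Decidable (Pre_add_dig n) := by unfold Pre_add_dig; infer_instance
def pvWitness_add_dig : Int := 38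

def Spec_add_dig (n : Int) (out : Int) : Prop := out = add_dig_alt n
instance (n : Int) (out : Int) : Decidable (Spec_add_dig n out) := by unfold Spec_add_dig; infer_instance

-- ===== CLAIM (what is proved, stated in full; the proofs are below) =====
def Claim_equal_add_dig : Prop := ∀ (n : Int), Dom_add_dig n → Pre_add_dig n → Spec_add_dig n (add_dig n)

-- ===== LEMMAS AND PROOFS =====

-- str(n) for a natural number, via Nat.toDigitsCore with sufficient fuel
theorem pvToDigitsCore_eq (fuel : Nat) : ∀ n ds, n < fuel →
    Nat.toDigitsCore 10 fuel n ds =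
      if n = 0 then '0' :: ds else ((Nat.digits 10 n).reverse.map Nat.digitChar) ++ ds := by
  induction fuel with
  | zero => intro n ds h; omega
  | succ fuel ih =>
    intro n ds h
    rcases Nat.eq_zero_or_pos n with h0 | h0
    · subst h0; simp [Nat.toDigitsCore]; decide
    · rw [Nat.toDigitsCore]
      simp only [if_neg (by omega : ¬ n = 0)]
      by_cases hq : n / 10 = 0
      · have hn10 : n < 10 := by omega
        rw [if_pos hq, Nat.digits_def' (by norm_num : 1 < 10) h0]
        simp [hq, Nat.mod_eq_of_lt hn10]
      · rw [if_neg hq, ih (n / 10) _ (by omega),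
          if_neg hq, Nat.digits_def' (by norm_num : 1 < 10) h0]
        simp

theorem pvToChars_nat (m : Nat) : PySem.Int.toChars (m : Int) =
    if m = 0 then ['0'] else (Nat.digits 10 m).reverse.map Nat.digitChar := by
  rw [PySem.Int.toChars]
  rw [if_neg (by omega : ¬ ((m : Int)) < 0)]
  rw [Nat.toDigits]
  have : ((m : Int)).toNat = m := by omega
  rw [this, pvToDigitsCore_eq (m + 1) m [] (by omega)]
  split <;> simp

theorem pvCharInt_digitChar (d : Nat) (hd : d < 10) : pvCharInt (Nat.digitChar d) = (d : Int) := by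
  interval_cases d <;> decide

theorem pvStrDigits_nat (m : Nat) : pvStrDigits (m : Int) =
    if m = 0 then [0] else (Nat.digits 10 m).reverse.map (fun d : Nat => (d : Int)) := by
  rw [pvStrDigits, pvToChars_nat]
  split
  · decide
  · rw [List.map_map]
    apply List.map_congr_left
    intro d hd
    exact pvCharInt_digitChar d (Nat.digits_lt_base (by norm_num) (List.mem_reverse.mp hd))

theorem pvStrDigits_sum (m : Nat) :
    (pvStrDigits (m : Int)).sum = ((Nat.digits 10 m).sum : Int) := by
  rw [pvStrDigits_nat]
  split
  · simp_all
  · rw [← List.sum_reverse (Nat.digits 10 m)]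
    exact (Nat.cast_list_sum _).symm

theorem pvStrDigits_len (m : Nat) : 1 < (pvStrDigits (m : Int)).length ↔ 10 ≤ m := by
  rw [pvStrDigits_nat]
  split
  · simp_all
  · rename_i h0
    rw [List.length_map, List.length_reverse]
    constructor
    · intro h
      by_contra hlt
      have h1 : Nat.digits 10 m = [m % 10] := by
        rw [Nat.digits_def' (by norm_num : 1 < 10) (by omega)]
        have : m / 10 = 0 := by omega
        simp [this]
      rw [h1] at h
      simp at h
    · intro h
      rw [Nat.digits_def' (by norm_num : 1 < 10) (by omega)]
      have h3 : 1 ≤ m / 10 := Nat.le_div_iff_mul_le (by norm_num) |>.mpr (by omega)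
      have h4 : Nat.digits 10 (m / 10) ≠ [] := Nat.digits_ne_nil_iff_ne_zero.mpr (by omega)
      have h5 : 0 < (Nat.digits 10 (m / 10)).length := List.length_pos_iff.mpr h4
      simp only [List.length_cons]
      omega

-- the base-10 digit sum is below m once m has two digits
theorem pvDigitsSum_le (m : Nat) : (Nat.digits 10 m).sum ≤ m := by
  induction m using Nat.strong_induction_on with
  | _ m ih =>
    rcases Nat.eq_zero_or_pos m with h0 | h0
    · simp [h0]
    · rw [Nat.digits_def' (by norm_num : 1 < 10) h0]
      have := ih (m / 10) (Nat.div_lt_self h0 (by norm_num))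
      have h2 := Nat.mod_add_div m 10
      simp only [List.sum_cons]
      omega

theorem pvDigitsSum_lt (m : Nat) (h : 10 ≤ m) : (Nat.digits 10 m).sum < m := by
  rw [Nat.digits_def' (by norm_num : 1 < 10) (by omega)]
  have h1 := pvDigitsSum_le (m / 10)
  have h2 := Nat.mod_add_div m 10
  have h3 : 1 ≤ m / 10 := Nat.le_div_iff_mul_le (by norm_num) |>.mpr (by omega)
  simp only [List.sum_cons]
  omega

theorem pvDigitSumGo_eq (m : Nat) : ∀ fuel, m < fuel → ∀ s : Int,
    pvDigitSumGo fuel (m : Int) s = s + ((Nat.digits 10 m).sum : Int) := by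
  induction m using Nat.strong_induction_on with
  | _ m ih =>
    intro fuel hfuel s
    obtain ⟨f, rfl⟩ : ∃ f, fuel = f + 1 := ⟨fuel - 1, by omega⟩
    rw [pvDigitSumGo]
    rcases Nat.eq_zero_or_pos m with h0 | h0
    · subst h0; simp
    · have hpos : (0 : Int) < (m : Int) := by exact_mod_cast h0
      rw [if_pos hpos,
        PySem.Int.floordiv_eq_ediv_of_pos (by norm_num),
        PySem.Int.mod_eq_emod_of_pos (by norm_num)]
      have hdiv : ((m : Int)) / 10 = ((m / 10 : Nat) : Int) := by push_cast; rfl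
      have hmod : ((m : Int)) % 10 = ((m % 10 : Nat) : Int) := by push_cast; rfl
      rw [hdiv, hmod, ih (m / 10) (Nat.div_lt_self h0 (by norm_num)) f (by omega),
        Nat.digits_def' (by norm_num : 1 < 10) h0]
      simp only [List.sum_cons]
      push_cast
      ring

theorem pvDigitSum_eq (m : Nat) : pvDigitSum (m : Int) = ((Nat.digits 10 m).sum : Int) := by
  rw [pvDigitSum]
  have ht : ((m : Int)).toNat = m := by omega
  rw [ht, pvDigitSumGo_eq m (m + 1) (by omega) 0]
  ring

theorem pvLoopA_eq_altGo (m : Nat) : ∀ fA fB, m < fA → m < fB → ∀ steps : Int,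
    pvLoopA fA (pvStrDigits (m : Int)) steps = steps + pvAltGo fB (m : Int) := by
  induction m using Nat.strong_induction_on with
  | _ m ih =>
    intro fA fB hA hB steps
    obtain ⟨a, rfl⟩ : ∃ a, fA = a + 1 := ⟨fA - 1, by omega⟩
    obtain ⟨b, rfl⟩ : ∃ b, fB = b + 1 := ⟨fB - 1, by omega⟩
    rw [pvLoopA, pvAltGo]
    by_cases h10 : 10 ≤ m
    · rw [if_pos ((pvStrDigits_len m).mpr h10), pvStrDigits_sum]
      have hs := pvDigitsSum_lt m h10
      rw [ih ((Nat.digits 10 m).sum) (by omega) a b (by omega) (by omega) (steps + 1)]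
      rw [if_neg (by exact_mod_cast not_lt.mpr h10), pvDigitSum_eq]
      ring
    · rw [if_neg (by rw [pvStrDigits_len]; omega),
        if_pos (by exact_mod_cast (by omega : m < 10))]
      ring

-- ===== VERDICT (by name: the statement is the Claim_ definition above) =====
theorem add_dig_spec : Claim_equal_add_dig := by
  intro n _ hpre
  unfold Pre_add_dig at hpre
  unfold Spec_add_dig add_dig add_dig_alt
  rw [if_neg (by omega : ¬ n < 0), if_neg (by omega : ¬ n < 0)]
  have hn : n = ((n.toNat : Nat) : Int) := by omega
  have h := pvLoopA_eq_altGo n.toNat (n.toNat + 1) (n.toNat + 1) (by omega) (by omega) 0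
  rw [← hn] at h
  simpa using h
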